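-- pv_equiv track=rewrite | github.com/SRI-International/QC-App-Oriented-Benchmarks | _common/cudaq/execute.py | _distribute_circuits_contiguous
-- ===== SOURCE A (Python) =====
-- def _distribute_circuits_contiguous(circuits: list, num_workers: int) -> list:
--     """
--     Distribute circuits into contiguous blocks for each worker.
--
--     Args:
--         circuits: List of circuits to distribute
--         num_workers: Number of workers (GPUs or MPI ranks)
--
--     Returns:
--         List of lists, where each inner list is the circuits for one worker
--     """
--     n = len(circuits)
--     if num_workers <= 0 or n == 0:
--         return [circuits]
--
--     # Calculate base size and remainder
--     base_size = n // num_workers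
--     remainder = n % num_workers
--
--     blocks = []
--     start = 0
--     for i in range(num_workers):
--         # First 'remainder' workers get one extra circuit
--         size = base_size + (1 if i < remainder else 0)
--         if size > 0:
--             blocks.append(circuits[start:start + size])
--         else:
--             blocks.append([])
--         start += size
--
--     return blocks
-- ===== SOURCE B (Python) =====
-- def _distribute_circuits_contiguous(circuits: list, num_workers: int) -> list:
--     """
--     Distribute circuits into contiguous blocks for each worker.
--
--     Builds the answer back-to-front: repeatedly peel the LAST block, of size
--     len(rest) // k when k workers remain, off the end of the list, then
--     reverse the collected blocks.  Floor-splitting from the end automatically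
--     leaves the extra circuits with the first len % num_workers workers; no
--     base-size/remainder bookkeeping and no running start index are needed.
--     """
--     if num_workers <= 0 or not circuits:
--         return [circuits]
--     rest = list(circuits)
--     blocks = []
--     k = num_workers
--     while k > 0:
--         cut = len(rest) - len(rest) // k
--         blocks.append(rest[cut:])
--         del rest[cut:]
--         k -= 1
--     blocks.reverse()
--     return blocks
-- ===== Notes on version B (the rewrite author's own statement) =====
-- stated objective: alternative
-- what changed: Instead of precomputing base size and remainder and walking forward with a running start index, B builds the answer back-to-front: it repeatedly peels the last block, of size len(rest)//k with k workers remaining, off the end of the list and reverses the collected blocks; floor-splitting from the end leaves the extras with the first len % num_workers workers automatically.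
import Mathlib
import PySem

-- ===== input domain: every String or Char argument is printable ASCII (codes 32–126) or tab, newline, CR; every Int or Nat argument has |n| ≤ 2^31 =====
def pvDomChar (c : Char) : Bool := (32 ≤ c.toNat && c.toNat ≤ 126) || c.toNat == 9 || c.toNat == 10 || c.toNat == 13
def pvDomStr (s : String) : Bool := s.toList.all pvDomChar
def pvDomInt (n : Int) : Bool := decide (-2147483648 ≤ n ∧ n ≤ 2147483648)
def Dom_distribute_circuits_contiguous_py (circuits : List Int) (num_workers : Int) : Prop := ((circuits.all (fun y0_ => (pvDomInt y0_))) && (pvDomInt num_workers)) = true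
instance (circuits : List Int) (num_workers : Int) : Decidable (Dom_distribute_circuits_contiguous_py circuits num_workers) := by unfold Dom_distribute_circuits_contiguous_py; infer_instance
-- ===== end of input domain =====

-- B replaces A's base/remainder computation and running-start loop by a back-to-front
-- construction: peel the LAST block (of size len(rest)//k) off the end each step, then
-- reverse the collected blocks; same cost, a different decomposition.

-- ===== PORT A =====
def distribute_circuits_contiguous_py (circuits : List Int) (num_workers : Int) : List (List Int) :=
  let n : Int := PySem.List.len circuits
  if num_workers ≤ 0 ∨ n = 0 then [circuits]
  else
    let base_size := PySem.Int.floordiv n num_workers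
    let remainder := PySem.Int.mod n num_workers
    let st := (PySem.List.pyRange 0 num_workers 1).foldl
      (fun (st : List (List Int) × Int) i =>
        let size := base_size + (if i < remainder then (1 : Int) else 0)
        let blocks := if size > 0
          then st.1 ++ [PySem.List.slice circuits (some st.2) (some (st.2 + size))]
          else st.1 ++ [[]]
        (blocks, st.2 + size)) ([], 0)
    st.1

-- ===== PORT B =====
-- the while loop of Source B: state (rest, k, blocks); terminates because k decreases
def pvLoopB (rest : List Int) (k : Int) (blocks : List (List Int)) : List (List Int) :=
  if k > 0 then
    let cut := PySem.List.len rest - PySem.Int.floordiv (PySem.List.len rest) k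
    pvLoopB (PySem.List.slice rest none (some cut)) (k - 1)
      (blocks ++ [PySem.List.slice rest (some cut) none])
  else blocks
termination_by k.toNat
decreasing_by omega

def distribute_circuits_contiguous_py_alt (circuits : List Int) (num_workers : Int) : List (List Int) :=
  if num_workers ≤ 0 ∨ circuits = [] then [circuits]
  else (pvLoopB circuits num_workers []).reverse

-- ===== PRECONDITION & SPEC =====
def Spec_distribute_circuits_contiguous_py (circuits : List Int) (num_workers : Int) (out : List (List Int)) : Prop := out = distribute_circuits_contiguous_py_alt circuits num_workers
instance (circuits : List Int) (num_workers : Int) (out : List (List Int)) : Decidable (Spec_distribute_circuits_contiguous_py circuits num_workers out) := by unfold Spec_distribute_circuits_contiguous_py; infer_instance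

-- ===== CLAIM (what is proved, stated in full; the proofs are below) =====
def Claim_equal_distribute_circuits_contiguous_py : Prop := ∀ (circuits : List Int) (num_workers : Int), Dom_distribute_circuits_contiguous_py circuits num_workers → Spec_distribute_circuits_contiguous_py circuits num_workers (distribute_circuits_contiguous_py circuits num_workers)

-- ===== LEMMAS AND PROOFS =====

-- closed-form start index of worker i in the balanced contiguous partition
def pvBound (base rem i : Int) : Int := i * base + min i rem

lemma pvBound_step (base rem k : Int) :
    pvBound base rem (k + 1) = pvBound base rem k + (base + if k < rem then (1 : Int) else 0) := by
  unfold pvBound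
  have h : (k + 1) * base = k * base + base := by ring
  rw [h]; omega

lemma pvBound_nonneg (base rem i : Int) (hb : 0 ≤ base) (hr : 0 ≤ rem) (hi : 0 ≤ i) :
    0 ≤ pvBound base rem i := by
  unfold pvBound
  have h1 : 0 ≤ i * base := mul_nonneg hi hb
  omega

-- A's loop over range(W) builds exactly the boundary slices, with start = pvBound W
lemma loopA_eq (circuits : List Int) (base rem : Int) (hb : 0 ≤ base) (hr : 0 ≤ rem) (W : Nat) :
    (PySem.List.pyRange 0 (W : Int)).foldl
      (fun (st : List (List Int) × Int) i =>
        let size := base + (if i < rem then (1 : Int) else 0)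
        let blocks := if size > 0
          then st.1 ++ [PySem.List.slice circuits (some st.2) (some (st.2 + size))]
          else st.1 ++ [[]]
        (blocks, st.2 + size)) ([], 0)
    = ((PySem.List.pyRange 0 (W : Int)).map (fun i =>
          PySem.List.slice circuits (some (pvBound base rem i)) (some (pvBound base rem (i + 1)))),
        pvBound base rem (W : Int)) := by
  induction W with
  | zero => simp [pvBound]; omega
  | succ w ih =>
    have hcast : (((w + 1 : Nat)) : Int) = (w : Int) + 1 := by push_cast; ring
    rw [hcast, PySem.List.pyRange_one_succ_right (by positivity), List.foldl_append,
        List.map_append, ih]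
    simp only [List.foldl_cons, List.foldl_nil, List.map_cons, List.map_nil]
    have hstep := pvBound_step base rem (w : Int)
    by_cases h : base + (if (w : Int) < rem then (1 : Int) else 0) > 0
    · simp only [if_pos h, Prod.mk.injEq]
      refine ⟨by rw [hstep], by rw [hstep]⟩
    · have hz : base + (if (w : Int) < rem then (1 : Int) else 0) = 0 := by
        split_ifs at h ⊢ <;> omega
      have hbw := pvBound_nonneg base rem (w : Int) hb hr (by positivity)
      rw [hz] at hstep
      simp only [if_neg h, Prod.mk.injEq]
      refine ⟨?_, by omega⟩
      rw [hstep, add_zero, PySem.List.slice_toNat circuits hbw hbw]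
      simp

-- pvBound is monotone in the worker index
lemma pvBound_mono (b r i j : Int) (hb : 0 ≤ b) (hij : i ≤ j) :
    pvBound b r i ≤ pvBound b r j := by
  unfold pvBound
  have h1 : i * b ≤ j * b := mul_le_mul_of_nonneg_right hij hb
  have h2 : min i r ≤ min j r := by omega
  linarith

-- slicing inside a prefix is slicing the original
lemma slice_take (l : List Int) (c x y : Int) (hx : 0 ≤ x) (hy : 0 ≤ y) (hyc : y ≤ c) :
    PySem.List.slice (l.take c.toNat) (some x) (some y) = PySem.List.slice l (some x) (some y) := by
  rw [PySem.List.slice_toNat _ hx hy, PySem.List.slice_toNat _ hx hy, List.drop_take,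
      List.take_take]
  congr 1
  omega

-- B's back-to-front floor-split loop collects the boundary blocks in reverse order
lemma loopB_eq (k : Nat) (l : List Int) (acc : List (List Int)) (b r : Int)
    (hb : 0 ≤ b) (hr : 0 ≤ r) (hrk : r < (k : Int)) (heq : b * (k : Int) + r = (l.length : Int)) :
    pvLoopB l (k : Int) acc
      = acc ++ ((PySem.List.pyRange 0 (k : Int)).map (fun i =>
          PySem.List.slice l (some (pvBound b r i)) (some (pvBound b r (i + 1))))).reverse := by
  induction k generalizing l acc b r with
  | zero => omega
  | succ k ih =>
    have hK : ((k + 1 : Nat) : Int) > 0 := by push_cast; omega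
    rw [pvLoopB, if_pos hK]
    set K : Int := ((k + 1 : Nat) : Int) with hKdef
    have hKk : K = (k : Int) + 1 := by rw [hKdef]; push_cast; ring
    set n : Int := (l.length : Int) with hndef
    have hn0 : 0 ≤ n := by positivity
    have hlen : PySem.List.len l = n := by simp [PySem.List.len_eq, hndef]
    have hc : b * K = (k : Int) * b + b := by rw [hKk]; ring
    have hsize : PySem.Int.floordiv n K = b := by
      rw [PySem.Int.floordiv_eq_iff_of_pos (by omega : (0 : Int) < K)]
      constructor <;> nlinarith
    simp only [hlen, hsize]
    have hcut0 : 0 ≤ n - b := by nlinarith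
    have h1 : pvBound b r (k : Int) = n - b := by
      unfold pvBound
      have hmin : min (k : Int) r = r := by omega
      rw [hmin]
      linarith
    have h2 : pvBound b r ((k : Int) + 1) = n := by
      unfold pvBound
      have hmin : min ((k : Int) + 1) r = r := by omega
      have hc2 : ((k : Int) + 1) * b = (k : Int) * b + b := by ring
      rw [hmin, hc2]
      linarith
    have hblock : PySem.List.slice l (some (n - b)) none
        = PySem.List.slice l (some (pvBound b r (k : Int))) (some (pvBound b r ((k : Int) + 1))) := by
      rw [h1, h2, PySem.List.slice_from _ hcut0, PySem.List.slice_toNat _ hcut0 hn0]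
      have hlt : n.toNat - (n - b).toNat = (l.drop (n - b).toNat).length := by
        simp only [List.length_drop]
        omega
      rw [hlt, List.take_length]
    have hK1 : K - 1 = (k : Int) := by omega
    rw [hblock, hK1, PySem.List.slice_to _ hcut0, hKk,
        PySem.List.pyRange_one_succ_right (by positivity : (0 : Int) ≤ (k : Int)),
        List.map_append, List.reverse_append]
    rcases Nat.eq_zero_or_pos k with hk0 | hkpos
    · subst hk0
      rw [pvLoopB]
      simp
    · set b' : Int := if r = (k : Int) then b + 1 else b with hb'def
      set r' : Int := if r = (k : Int) then 0 else r with hr'def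
      have hb'0 : 0 ≤ b' := by rw [hb'def]; split_ifs <;> omega
      have hr'0 : 0 ≤ r' := by rw [hr'def]; split_ifs <;> omega
      have hr'k : r' < (k : Int) := by
        have : (0 : Int) < (k : Int) := by exact_mod_cast hkpos
        rw [hr'def]; split_ifs <;> omega
      have hlen' : (((l.take (n - b).toNat).length : Nat) : Int) = n - b := by
        simp only [List.length_take]
        omega
      have heq' : b' * (k : Int) + r' = (((l.take (n - b).toNat).length : Nat) : Int) := by
        rw [hlen', hb'def, hr'def]
        split_ifs with h
        · have he : (b + 1) * (k : Int) = (k : Int) * b + (k : Int) := by ring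
          linarith
        · have he : b * (k : Int) = (k : Int) * b := by ring
          linarith
      rw [ih (l.take (n - b).toNat) _ b' r' hb'0 hr'0 hr'k heq']
      have hbb : ∀ j : Int, 0 ≤ j → j ≤ (k : Int) → pvBound b' r' j = pvBound b r j := by
        intro j hj0 hjk
        rw [hb'def, hr'def]
        split_ifs with h
        · unfold pvBound
          have he : j * (b + 1) = j * b + j := by ring
          have hm1 : min j (0 : Int) = 0 := by omega
          have hm2 : min j r = j := by omega
          rw [he, hm1, hm2]
          linarith
        · rfl
      have hmap : ∀ i ∈ PySem.List.pyRange 0 (k : Int),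
          PySem.List.slice (l.take (n - b).toNat)
              (some (pvBound b' r' i)) (some (pvBound b' r' (i + 1)))
            = PySem.List.slice l (some (pvBound b r i)) (some (pvBound b r (i + 1))) := by
        intro i hi
        obtain ⟨hi0, hik⟩ := PySem.List.mem_pyRange_one.mp hi
        rw [hbb i hi0 (by omega), hbb (i + 1) (by omega) (by omega)]
        exact slice_take l (n - b) _ _ (pvBound_nonneg b r i hb hr hi0)
          (pvBound_nonneg b r (i + 1) hb hr (by omega))
          (h1 ▸ pvBound_mono b r (i + 1) (k : Int) hb (by omega))
      rw [List.map_congr_left hmap]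
      simp

-- ===== VERDICT (by name: the statement is the Claim_ definition above) =====
theorem distribute_circuits_contiguous_py_spec : Claim_equal_distribute_circuits_contiguous_py := by
  intro circuits num_workers _
  unfold Spec_distribute_circuits_contiguous_py
  unfold distribute_circuits_contiguous_py distribute_circuits_contiguous_py_alt
  have hlen : PySem.List.len circuits = 0 ↔ circuits = [] := by
    simp [PySem.List.len_eq]
  by_cases hguard : num_workers ≤ 0 ∨ (PySem.List.len circuits) = 0
  · simp only [if_pos hguard]
    rw [if_pos (show num_workers ≤ 0 ∨ circuits = [] by tauto)]
  · simp only [if_neg hguard]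
    rw [if_neg (show ¬(num_workers ≤ 0 ∨ circuits = []) by tauto)]
    simp only [not_or, not_le] at hguard
    obtain ⟨hw, hn⟩ := hguard
    have hwpos : 0 < num_workers := by omega
    have hb : 0 ≤ PySem.Int.floordiv (PySem.List.len circuits) num_workers := by
      rw [PySem.Int.floordiv_eq_ediv_of_pos hwpos]
      have : (0 : Int) ≤ PySem.List.len circuits := by
        simp [PySem.List.len_eq]
      exact Int.ediv_nonneg this (le_of_lt hwpos)
    have hr : 0 ≤ PySem.Int.mod (PySem.List.len circuits) num_workers :=
      PySem.Int.mod_nonneg _ hwpos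
    have hWcast : num_workers = ((num_workers.toNat : Int)) := by omega
    rw [hWcast] at hb hr ⊢
    have hWpos' : (0 : Int) < ((num_workers.toNat : Nat) : Int) := by omega
    have heq := PySem.Int.floordiv_mul_add_mod (PySem.List.len circuits) ((num_workers.toNat : Nat) : Int)
    rw [loopA_eq circuits _ _ hb hr num_workers.toNat,
        loopB_eq num_workers.toNat circuits [] _ _ hb hr
          (PySem.Int.mod_lt _ hWpos') (by simpa [PySem.List.len_eq] using heq)]
    simp [PySem.List.len_eq]
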